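-- pv_equiv track=rewrite | github.com/MinKyeom/KMK-DREAM | Programmers/lv2/롤 케이크 자르기.py | solution
-- ===== SOURCE A (Python) =====
-- def solution(topping):
--     answer = 0
--
--     l, r = 0, len(topping)
--     idx1 = 0
--     while l <= r:
--         m = (l + r) // 2
--         left = len(set(topping[:m]))
--         right = len(set(topping[m:]))
--         if left < right:
--             l = m + 1
--         elif left >= right:
--             idx1 = m
--             r = m - 1
--
--     l, r = 0, len(topping)
--     idx2 = 0
--     while l <= r:
--         m = (l + r) // 2
--         left = len(set(topping[:m]))
--         right = len(set(topping[m:]))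
--         if left <= right:
--             idx2 = m
--             l = m + 1
--         elif left > right:
--             r = m - 1
--
--     answer = max(idx2 - idx1 + 1, 0)
--
--     return answer
-- ===== SOURCE B (Python) =====
-- def solution(topping):
--     seen = set()
--     pre = [0]
--     for x in topping:
--         seen.add(x)
--         pre.append(len(seen))
--     seen = set()
--     suf = [0]
--     for x in reversed(topping):
--         seen.add(x)
--         suf.append(len(seen))
--     suf.reverse()
--     return sum(p == s for p, s in zip(pre, suf))
-- ===== Notes on version B (the rewrite author's own statement) =====
-- stated objective: faster
-- what changed: A runs two binary searches, each step rebuilding both sets from scratch, to locate the interval of balanced cut points; B makes two linear scans that incrementally build the prefix- and suffix-distinct-count tables and counts the positions where they agree.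
import Mathlib
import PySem

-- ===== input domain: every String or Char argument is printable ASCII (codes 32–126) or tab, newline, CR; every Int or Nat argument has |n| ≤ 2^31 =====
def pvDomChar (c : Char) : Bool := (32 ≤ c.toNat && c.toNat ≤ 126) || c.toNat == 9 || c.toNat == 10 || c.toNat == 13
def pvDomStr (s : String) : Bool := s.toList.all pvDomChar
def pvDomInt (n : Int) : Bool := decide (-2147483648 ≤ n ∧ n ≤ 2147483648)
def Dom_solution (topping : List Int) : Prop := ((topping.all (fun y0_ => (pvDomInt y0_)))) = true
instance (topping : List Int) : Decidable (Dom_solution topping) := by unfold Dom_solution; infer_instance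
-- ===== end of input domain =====

-- B replaces A's two binary searches (each step rebuilding both sets) by two linear scans
-- building prefix/suffix distinct-count tables, counting the positions where they agree.

-- ===== PORT A =====
-- first while loop of A: l, r, idx1 evolve; returns final idx1
def solLoop1 (topping : List Int) (l r idx1 : Int) : Int :=
  if h : l ≤ r then
    let m := PySem.Int.floordiv (l + r) 2
    let left := (PySem.Set.ofList (PySem.List.slice topping none (some m))).length
    let right := (PySem.Set.ofList (PySem.List.slice topping (some m) none)).length
    if (left : Int) < (right : Int) then solLoop1 topping (m + 1) r idx1
    else solLoop1 topping l (m - 1) m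
  else idx1
termination_by (r + 1 - l).toNat
decreasing_by
  all_goals
    have hb := PySem.Int.floordiv_two_mid_bounds (lo := l) (hi := r) h
    omega

-- second while loop of A: returns final idx2
def solLoop2 (topping : List Int) (l r idx2 : Int) : Int :=
  if h : l ≤ r then
    let m := PySem.Int.floordiv (l + r) 2
    let left := (PySem.Set.ofList (PySem.List.slice topping none (some m))).length
    let right := (PySem.Set.ofList (PySem.List.slice topping (some m) none)).length
    if (left : Int) ≤ (right : Int) then solLoop2 topping (m + 1) r m
    else solLoop2 topping l (m - 1) idx2
  else idx2
termination_by (r + 1 - l).toNat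
decreasing_by
  all_goals
    have hb := PySem.Int.floordiv_two_mid_bounds (lo := l) (hi := r) h
    omega

def solution (topping : List Int) : Int :=
  let idx1 := solLoop1 topping 0 (topping.length : Int) 0
  let idx2 := solLoop2 topping 0 (topping.length : Int) 0
  max (idx2 - idx1 + 1) 0

-- ===== PORT B =====
-- one scan of Source B: seen = set(); out = [0]; for x in xs: seen.add(x); out.append(len(seen))
def altScan (xs : List Int) : PySem.Set Int × List Int :=
  xs.foldl (fun st x =>
      let s := PySem.Set.add st.1 x
      (s, st.2 ++ [(s.length : Int)]))
    (PySem.Set.empty, ([(0 : Int)]))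

def solution_alt (topping : List Int) : Int :=
  let pre := (altScan topping).2
  let suf := ((altScan topping.reverse).2).reverse
  (pre.zip suf).foldl (fun acc ps => acc + (if ps.1 = ps.2 then 1 else 0)) 0

-- ===== PRECONDITION & SPEC =====
def Spec_solution (topping : List Int) (out : Int) : Prop := out = solution_alt topping
instance (topping : List Int) (out : Int) : Decidable (Spec_solution topping out) := by unfold Spec_solution; infer_instance

-- ===== CLAIM (what is proved, stated in full; the proofs are below) =====
def Claim_equal_solution : Prop := ∀ (topping : List Int), Dom_solution topping → Spec_solution topping (solution topping)

-- ===== LEMMAS AND PROOFS =====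

-- distinct count of the length-m prefix / the suffix from m
def pd (xs : List Int) (m : Nat) : Nat := (PySem.Set.ofList (xs.take m)).length
def sd (xs : List Int) (m : Nat) : Nat := (PySem.Set.ofList (xs.drop m)).length

theorem setLen_eq_card (xs : List Int) :
    (PySem.Set.ofList xs).length = xs.toFinset.card := by
  have hnd := PySem.Set.nodup_ofList (xs := xs)
  have hf : (PySem.Set.ofList xs).toFinset = xs.toFinset := by
    ext y; simp [PySem.Set.mem_ofList]
  calc (PySem.Set.ofList xs).length = (PySem.Set.ofList xs).toFinset.card :=
        (List.toFinset_card_of_nodup hnd).symm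
    _ = xs.toFinset.card := by rw [hf]

theorem pd_mono (xs : List Int) {m m' : Nat} (h : m ≤ m') : pd xs m ≤ pd xs m' := by
  unfold pd
  rw [setLen_eq_card, setLen_eq_card]
  apply Finset.card_le_card
  intro y hy
  simp only [List.mem_toFinset] at hy ⊢
  have : xs.take m = (xs.take m').take m := by rw [List.take_take, Nat.min_eq_left h]
  rw [this] at hy
  exact List.take_subset _ _ hy

theorem sd_anti (xs : List Int) {m m' : Nat} (h : m ≤ m') : sd xs m' ≤ sd xs m := by
  unfold sd
  rw [setLen_eq_card, setLen_eq_card]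
  apply Finset.card_le_card
  intro y hy
  simp only [List.mem_toFinset] at hy ⊢
  have : xs.drop m' = (xs.drop m).drop (m' - m) := by rw [List.drop_drop]; congr 1; omega
  rw [this] at hy
  exact List.mem_of_mem_drop hy

theorem sd_self (xs : List Int) : sd xs xs.length = 0 := by simp [sd, PySem.Set.ofList_nil]

theorem pd_zero (xs : List Int) : pd xs 0 = 0 := by simp [pd, PySem.Set.ofList_nil]

-- μ: least m with sd ≤ pd;  exists at m = length
theorem exP (xs : List Int) : ∃ m, sd xs m ≤ pd xs m :=
  ⟨xs.length, by rw [sd_self]; exact Nat.zero_le _⟩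

def muOf (xs : List Int) : Nat := Nat.find (exP xs)

-- ν: greatest m ≤ length with pd ≤ sd, via searching k = length - m
theorem exQ (xs : List Int) : ∃ k, pd xs (xs.length - k) ≤ sd xs (xs.length - k) :=
  ⟨xs.length, by simp [pd_zero]⟩

def nuOf (xs : List Int) : Nat := xs.length - Nat.find (exQ xs)

theorem mu_le_len (xs : List Int) : muOf xs ≤ xs.length :=
  Nat.find_le (by rw [sd_self]; exact Nat.zero_le _)

theorem mu_spec (xs : List Int) : sd xs (muOf xs) ≤ pd xs (muOf xs) := Nat.find_spec (exP xs)

-- the predicate sd ≤ pd is upward closed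
theorem P_up (xs : List Int) {m m' : Nat} (h : m ≤ m') (hp : sd xs m ≤ pd xs m) :
    sd xs m' ≤ pd xs m' :=
  le_trans (sd_anti xs h) (le_trans hp (pd_mono xs h))

-- the predicate pd ≤ sd is downward closed
theorem Q_down (xs : List Int) {m m' : Nat} (h : m ≤ m') (hq : pd xs m' ≤ sd xs m') :
    pd xs m ≤ sd xs m :=
  le_trans (pd_mono xs h) (le_trans hq (sd_anti xs h))

theorem nu_le_len (xs : List Int) : nuOf xs ≤ xs.length := Nat.sub_le _ _

theorem nu_spec (xs : List Int) : pd xs (nuOf xs) ≤ sd xs (nuOf xs) := Nat.find_spec (exQ xs)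

theorem nu_max (xs : List Int) {m : Nat} (hm : m ≤ xs.length) (h : nuOf xs < m) :
    ¬ pd xs m ≤ sd xs m := by
  intro hq
  have hk : xs.length - m < Nat.find (exQ xs) := by
    have hfind : Nat.find (exQ xs) ≤ xs.length := Nat.find_le (by simp [pd_zero])
    unfold nuOf at h; omega
  have := Nat.find_min (exQ xs) hk
  have hmm : xs.length - (xs.length - m) = m := by omega
  rw [hmm] at this
  exact this hq

-- mu characterizes least: sd m ≤ pd m → mu ≤ m
theorem mu_le (xs : List Int) {m : Nat} (h : sd xs m ≤ pd xs m) : muOf xs ≤ m :=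
  Nat.find_le h

theorem le_nu (xs : List Int) {m : Nat} (hm : m ≤ xs.length) (h : pd xs m ≤ sd xs m) :
    m ≤ nuOf xs := by
  by_contra hc
  exact nu_max xs hm (by omega) h

-- slices at a nonnegative in-range index compute pd/sd
theorem left_eq (xs : List Int) (m : Int) (h0 : 0 ≤ m) :
    (PySem.Set.ofList (PySem.List.slice xs none (some m))).length = pd xs m.toNat := by
  rw [PySem.List.slice_to xs h0]; rfl

theorem right_eq (xs : List Int) (m : Int) (h0 : 0 ≤ m) :
    (PySem.Set.ofList (PySem.List.slice xs (some m) none)).length = sd xs m.toNat := by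
  rw [PySem.List.slice_from xs h0]; rfl

-- loop 1 computes μ
theorem loop1_eq (xs : List Int) (l r idx1 : Int) (h0 : 0 ≤ l) (hr : r ≤ (xs.length : Int))
    (hlμ : l ≤ (muOf xs : Int)) (hidx : idx1 = (muOf xs : Int) ∨ (muOf xs : Int) ≤ r) :
    solLoop1 xs l r idx1 = (muOf xs : Int) := by
  rw [solLoop1]
  split
  · next h =>
    have hb := PySem.Int.floordiv_two_mid_bounds (lo := l) (hi := r) h
    set m := PySem.Int.floordiv (l + r) 2 with hm
    have hm0 : 0 ≤ m := by omega
    have hmn : m ≤ (xs.length : Int) := by omega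
    have hmt : (m.toNat : Int) = m := by omega
    simp only [left_eq xs m hm0, right_eq xs m hm0]
    split
    · next hlt =>
      -- pd < sd at m: μ > m
      have hnp : ¬ sd xs m.toNat ≤ pd xs m.toNat := by omega
      have hμgt : m.toNat < muOf xs := by
        by_contra hc
        exact hnp (P_up xs (by omega) (mu_spec xs))
      exact loop1_eq xs (m + 1) r idx1 (by omega) hr (by omega) hidx
    · next hge =>
      -- sd ≤ pd at m: μ ≤ m
      have hp : sd xs m.toNat ≤ pd xs m.toNat := by omega
      have hμle : muOf xs ≤ m.toNat := mu_le xs hp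
      exact loop1_eq xs l (m - 1) m h0 (by omega) hlμ (by omega)
  · next h =>
    rcases hidx with h1 | h2
    · exact h1
    · omega
termination_by (r + 1 - l).toNat
decreasing_by
  all_goals omega

-- loop 2 computes ν
theorem loop2_eq (xs : List Int) (l r idx2 : Int) (h0 : 0 ≤ l) (hr : r ≤ (xs.length : Int))
    (hν : (nuOf xs : Int) ≤ r) (hidx : idx2 = (nuOf xs : Int) ∨ l ≤ (nuOf xs : Int)) :
    solLoop2 xs l r idx2 = (nuOf xs : Int) := by
  rw [solLoop2]
  split
  · next h =>
    have hb := PySem.Int.floordiv_two_mid_bounds (lo := l) (hi := r) h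
    set m := PySem.Int.floordiv (l + r) 2 with hm
    have hm0 : 0 ≤ m := by omega
    have hmn : m ≤ (xs.length : Int) := by omega
    have hmt : (m.toNat : Int) = m := by omega
    simp only [left_eq xs m hm0, right_eq xs m hm0]
    split
    · next hle =>
      -- pd ≤ sd at m: m ≤ ν
      have hq : pd xs m.toNat ≤ sd xs m.toNat := by omega
      have hmν : m.toNat ≤ nuOf xs := le_nu xs (by omega) hq
      exact loop2_eq xs (m + 1) r m (by omega) hr hν (by omega)
    · next hgt =>
      -- sd < pd at m: ν < m
      have hnq : ¬ pd xs m.toNat ≤ sd xs m.toNat := by omega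
      have hνlt : nuOf xs < m.toNat := by
        by_contra hc
        exact hnq (Q_down xs (by omega) (nu_spec xs))
      exact loop2_eq xs l (m - 1) idx2 h0 (by omega) (by omega) hidx
  · next h =>
    rcases hidx with h1 | h2
    · exact h1
    · omega
termination_by (r + 1 - l).toNat
decreasing_by
  all_goals omega

-- A's value in closed form
theorem solution_closed (xs : List Int) :
    solution xs = max ((nuOf xs : Int) - (muOf xs : Int) + 1) 0 := by
  unfold solution
  rw [loop1_eq xs 0 (xs.length : Int) 0 (by omega) (by omega)
        (by exact_mod_cast Nat.zero_le _) (Or.inr (by exact_mod_cast mu_le_len xs)),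
      loop2_eq xs 0 (xs.length : Int) 0 (by omega) (by omega)
        (by exact_mod_cast nu_le_len xs) (Or.inr (by exact_mod_cast Nat.zero_le _))]

-- B's scan builds the table of prefix distinct counts
theorem altScan_snd (xs : List Int) (s : PySem.Set Int) (acc : List Int) :
    (xs.foldl (fun st x =>
        let t := PySem.Set.add st.1 x
        (t, st.2 ++ [(t.length : Int)])) (s, acc)).2
      = acc ++ (List.range xs.length).map
          (fun k => ((PySem.Set.update s (xs.take (k + 1))).length : Int)) := by
  induction xs generalizing s acc with
  | nil => simp
  | cons x t ih =>
    simp only [List.foldl_cons, ih]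
    rw [List.length_cons, List.range_succ_eq_map]
    simp [PySem.Set.update, List.map_map, Function.comp_def, List.append_assoc]

theorem altScan_eq (xs : List Int) :
    (altScan xs).2 = (List.range (xs.length + 1)).map (fun k => ((pd xs k : Nat) : Int)) := by
  unfold altScan
  rw [altScan_snd, List.range_succ_eq_map]
  simp only [List.map_cons, List.map_map, Function.comp_def, List.singleton_append]
  refine List.cons_eq_cons.mpr ⟨by simp [pd, PySem.Set.ofList_nil], ?_⟩
  apply List.map_congr_left
  intro k _
  rfl

-- reversing a map over range reindexes
theorem reverse_map_range {α : Type} (f : Nat → α) (N : Nat) :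
    (List.map f (List.range N)).reverse = List.map (fun k => f (N - 1 - k)) (List.range N) := by
  apply List.ext_getElem
  · simp
  · intro i h1 h2
    simp only [List.length_reverse, List.length_map, List.length_range] at h1 h2
    rw [List.getElem_reverse]
    simp only [List.getElem_map, List.getElem_range, List.length_map, List.length_range]

-- distinct count of a reversed prefix is the distinct count of the matching suffix
theorem pd_reverse (xs : List Int) (k : Nat) (_hk : k ≤ xs.length) :
    pd xs.reverse k = sd xs (xs.length - k) := by
  unfold pd sd
  rw [setLen_eq_card, setLen_eq_card]
  congr 1
  rw [List.take_reverse, List.toFinset_reverse]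

theorem suf_eq (xs : List Int) :
    ((altScan xs.reverse).2).reverse
      = (List.range (xs.length + 1)).map (fun k => ((sd xs k : Nat) : Int)) := by
  rw [altScan_eq, List.length_reverse, reverse_map_range]
  apply List.map_congr_left
  intro k hk
  rw [List.mem_range] at hk
  congr 1
  rw [pd_reverse xs (xs.length + 1 - 1 - k) (by omega)]
  congr 1
  omega

-- counting members of an interval inside range N
theorem countP_interval (N a b : Nat) :
    (List.range N).countP (fun m => decide (a ≤ m ∧ m ≤ b)) = min N (b + 1) - min N a := by
  induction N with
  | zero => simp
  | succ n ih =>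
    rw [List.range_succ, List.countP_append, ih]
    simp only [List.countP_cons, List.countP_nil]
    by_cases h : a ≤ n ∧ n ≤ b
    · simp [h]; omega
    · simp [h]; push Not at h; omega

-- equality positions are exactly the interval [μ, ν]
theorem eq_iff_interval (xs : List Int) (m : Nat) (hm : m ≤ xs.length) :
    (pd xs m = sd xs m) ↔ (muOf xs ≤ m ∧ m ≤ nuOf xs) := by
  constructor
  · intro h
    exact ⟨mu_le xs (le_of_eq h.symm), le_nu xs hm (le_of_eq h)⟩
  · rintro ⟨h1, h2⟩
    have hp : sd xs m ≤ pd xs m := P_up xs h1 (mu_spec xs)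
    have hq : pd xs m ≤ sd xs m := Q_down xs h2 (nu_spec xs)
    omega

theorem alt_closed (xs : List Int) :
    solution_alt xs = max ((nuOf xs : Int) - (muOf xs : Int) + 1) 0 := by
  unfold solution_alt
  rw [altScan_eq, suf_eq]
  simp only [List.zip_map', List.foldl_map]
  have hshape : (fun (acc : Int) (m : Nat) => acc + if ((pd xs m : Nat) : Int) = ((sd xs m : Nat) : Int) then 1 else 0)
      = fun (acc : Int) (m : Nat) => if ((pd xs m : Nat) : Int) = ((sd xs m : Nat) : Int) then acc + 1 else acc := by
    funext acc m; split <;> omega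
  rw [hshape, PySem.List.foldl_ite_add_one]
  have hc : (List.range (xs.length + 1)).countP
        (fun m => decide (((pd xs m : Nat) : Int) = ((sd xs m : Nat) : Int)))
      = (List.range (xs.length + 1)).countP (fun m => decide (muOf xs ≤ m ∧ m ≤ nuOf xs)) := by
    apply List.countP_congr
    intro m hmem
    rw [List.mem_range] at hmem
    simp only [decide_eq_true_eq, Int.natCast_inj]
    rw [eq_iff_interval xs m (by omega)]
  rw [hc, countP_interval]
  have h1 := mu_le_len xs
  have h2 := nu_le_len xs
  omega

-- ===== VERDICT (by name: the statement is the Claim_ definition above) =====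
theorem solution_spec : Claim_equal_solution := by
  intro topping _
  unfold Spec_solution
  rw [solution_closed, alt_closed]
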